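-- pv_equiv track=rewrite | github.com/auroraruiz/TFG-2022 | TFG.py | interval_vector
-- ===== SOURCE A (Python) =====
-- def interval_vector(melody):
--     interval_vec = []
--     i = 0
--     j = i+1
--     while i < (len(melody)-1) and j<(len(melody)):
--         if melody[i] == (-1) or melody[i] == 0:
--                i += 1
--                j = i+1
--         elif melody[j] != (-1) and melody[j] !=0:
--             interval_vec.append((melody[j]-melody[i]))
--             i += 1
--             j = i+1
--         else:
--             j += 1
--     return interval_vec
-- ===== SOURCE B (Python) =====
-- def interval_vector(melody):
--     valid = [x for x in melody if x != -1 and x != 0]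
--     return [b - a for a, b in zip(valid, valid[1:])]
-- ===== Notes on version B (the rewrite author's own statement) =====
-- stated objective: simpler
-- what changed: Replaces A's interleaved two-pointer scan (with one-step backtracking of i through invalid notes) by two plain passes: filter the valid notes, then take consecutive differences via zip.
import Mathlib
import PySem

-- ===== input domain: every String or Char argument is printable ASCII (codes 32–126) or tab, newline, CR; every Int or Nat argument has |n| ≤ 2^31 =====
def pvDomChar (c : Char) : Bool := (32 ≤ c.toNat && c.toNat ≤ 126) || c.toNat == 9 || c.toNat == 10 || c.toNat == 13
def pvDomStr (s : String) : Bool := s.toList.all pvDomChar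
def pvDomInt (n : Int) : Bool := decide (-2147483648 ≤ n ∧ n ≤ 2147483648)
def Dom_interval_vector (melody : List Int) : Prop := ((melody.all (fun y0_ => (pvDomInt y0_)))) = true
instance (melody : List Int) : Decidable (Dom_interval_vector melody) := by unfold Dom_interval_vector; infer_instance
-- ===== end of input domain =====

-- B replaces A's interleaved two-pointer scan by two passes (filter valid notes, then consecutive differences): simpler, same cost.

-- ===== PORT A =====
-- A's while loop over indices i, j; each branch keeps the same state updates.
-- Indices are always in range when read (guarded by the loop condition), so getD 0 is exact.
def interval_vector.loop (melody : List Int) (acc : List Int) (i j : Nat) : List Int :=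
  if h : i < melody.length - 1 ∧ j < melody.length then
    if melody.getD i 0 = -1 ∨ melody.getD i 0 = 0 then
      interval_vector.loop melody acc (i+1) (i+2)
    else if melody.getD j 0 ≠ -1 ∧ melody.getD j 0 ≠ 0 then
      interval_vector.loop melody (acc ++ [melody.getD j 0 - melody.getD i 0]) (i+1) (i+2)
    else
      interval_vector.loop melody acc i (j+1)
  else acc
termination_by (melody.length - i, melody.length - j)
decreasing_by
  · exact Prod.Lex.left _ _ (by omega)
  · exact Prod.Lex.left _ _ (by omega)
  · exact Prod.Lex.right _ (by omega)

def interval_vector (melody : List Int) : List Int :=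
  interval_vector.loop melody [] 0 1

-- ===== PORT B =====
def interval_vector_alt (melody : List Int) : List Int :=
  let valid := melody.filter (fun x => !(x == -1) && !(x == 0))
  List.zipWith (fun a b => b - a) valid (valid.drop 1)

-- ===== PRECONDITION & SPEC =====
def Spec_interval_vector (melody : List Int) (out : List Int) : Prop := out = interval_vector_alt melody
instance (melody : List Int) (out : List Int) : Decidable (Spec_interval_vector melody out) := by unfold Spec_interval_vector; infer_instance

-- ===== CLAIM (what is proved, stated in full; the proofs are below) =====
def Claim_equal_interval_vector : Prop := ∀ (melody : List Int), Dom_interval_vector melody → Spec_interval_vector melody (interval_vector melody)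

-- ===== LEMMAS AND PROOFS =====

def pvP : Int → Bool := fun x => !(x == -1) && !(x == 0)

def pvDiffs (l : List Int) : List Int := List.zipWith (fun a b => b - a) l (l.drop 1)

theorem pvP_eq_false {x : Int} (h : x = -1 ∨ x = 0) : pvP x = false := by
  simp [pvP]; tauto

theorem pvP_eq_true {x : Int} (h : ¬(x = -1 ∨ x = 0)) : pvP x = true := by
  simp [pvP]; tauto

theorem pvDiffs_short (l : List Int) (h : l.length ≤ 1) : pvDiffs l = [] := by
  match l, h with
  | [], _ => rfl
  | [a], _ => rfl

theorem pvDiffs_cons_cons (a b : Int) (t : List Int) :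
    pvDiffs (a :: b :: t) = (b - a) :: pvDiffs (b :: t) := rfl

theorem pv_filter_cons_false (x : Int) (l : List Int) (h : pvP x = false) :
    List.filter pvP (x :: l) = List.filter pvP l := by
  rw [List.filter_cons, h]; simp

theorem pv_filter_cons_true (x : Int) (l : List Int) (h : pvP x = true) :
    List.filter pvP (x :: l) = x :: List.filter pvP l := by
  rw [List.filter_cons, h]; simp

theorem pv_drop_cons (melody : List Int) (i : Nat) (h : i < melody.length) :
    melody.drop i = melody.getD i 0 :: melody.drop (i+1) := by
  rw [List.getD_eq_getElem _ _ h, List.drop_eq_getElem_cons h]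

-- Loop characterisation: from a fresh state (i, i+1) the loop appends the
-- consecutive differences of the valid notes of melody.drop i.
-- Proved by induction on the bound n ≥ melody.length - i, with an inner
-- induction (bound m ≥ melody.length - j) for the j-scanning states.
theorem pv_loop_main (melody : List Int) :
    ∀ n i acc, melody.length - i ≤ n →
      interval_vector.loop melody acc i (i+1)
        = acc ++ pvDiffs ((melody.drop i).filter pvP) := by
  intro n
  induction n with
  | zero =>
    intro i acc hn
    rw [interval_vector.loop, dif_neg (by omega)]
    rw [List.drop_eq_nil_of_le (by omega)]
    simp [pvDiffs]
  | succ n IHmain =>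
    intro i acc hn
    by_cases hg : i < melody.length - 1 ∧ i + 1 < melody.length
    · have hi : i < melody.length := by omega
      by_cases hinv : melody.getD i 0 = -1 ∨ melody.getD i 0 = 0
      · rw [interval_vector.loop, dif_pos hg, if_pos hinv]
        rw [IHmain (i+1) acc (by omega)]
        rw [pv_drop_cons melody i hi, pv_filter_cons_false _ _ (pvP_eq_false hinv)]
      · have hP := pvP_eq_true hinv
        -- inner scan: for any j > i with no valid note strictly between i and j
        have inner : ∀ m j acc', melody.length - j ≤ m → i < j →
            ((melody.drop (i+1)).filter pvP = (melody.drop j).filter pvP) →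
            interval_vector.loop melody acc' i j
              = acc' ++ pvDiffs (melody.getD i 0 :: (melody.drop j).filter pvP) := by
          intro m
          induction m with
          | zero =>
            intro j acc' hm _ _
            rw [interval_vector.loop, dif_neg (by omega)]
            rw [List.drop_eq_nil_of_le (by omega)]
            simp [pvDiffs]
          | succ m IHj =>
            intro j acc' hm hij hfil
            by_cases hj : j < melody.length
            · rw [interval_vector.loop, dif_pos ⟨hg.1, hj⟩, if_neg hinv]
              by_cases hjv : melody.getD j 0 ≠ -1 ∧ melody.getD j 0 ≠ 0
              · rw [if_pos hjv]
                rw [IHmain (i+1) _ (by omega)]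
                have hPj : pvP (melody.getD j 0) = true := pvP_eq_true (by tauto)
                have hdj : (melody.drop j).filter pvP
                    = melody.getD j 0 :: (melody.drop (j+1)).filter pvP := by
                  rw [pv_drop_cons melody j hj, pv_filter_cons_true _ _ hPj]
                rw [hfil, hdj, pvDiffs_cons_cons]
                simp
              · rw [if_neg hjv]
                have hPj : pvP (melody.getD j 0) = false := pvP_eq_false (by tauto)
                have hdj : (melody.drop j).filter pvP
                    = (melody.drop (j+1)).filter pvP := by
                  rw [pv_drop_cons melody j hj, pv_filter_cons_false _ _ hPj]
                rw [IHj (j+1) acc' (by omega) (by omega) (by rw [hfil, hdj]), hdj]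
            · rw [interval_vector.loop, dif_neg (by omega)]
              rw [List.drop_eq_nil_of_le (by omega)]
              simp [pvDiffs]
        have h1 := inner (melody.length - (i+1)) (i+1) acc (by omega) (by omega) rfl
        rw [h1, pv_drop_cons melody i hi, pv_filter_cons_true _ _ hP]
    · rw [interval_vector.loop, dif_neg hg]
      have : ((melody.drop i).filter pvP).length ≤ 1 := by
        calc ((melody.drop i).filter pvP).length ≤ (melody.drop i).length :=
              List.length_filter_le _ _
        _ = melody.length - i := List.length_drop
        _ ≤ 1 := by omega
      rw [pvDiffs_short _ this, List.append_nil]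

-- ===== VERDICT (by name: the statement is the Claim_ definition above) =====
theorem interval_vector_spec : Claim_equal_interval_vector := by
  intro melody _
  unfold Spec_interval_vector interval_vector interval_vector_alt
  have := pv_loop_main melody melody.length 0 [] (by omega)
  simpa [pvDiffs, pvP] using this
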